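-- pv_equiv track=rewrite | github.com/Niko-Prassas-Zocdoc/Stuff | new_role.py | is_camel_case_with_dots
-- ===== SOURCE A (Python) =====
-- def is_camel_case_with_dots(string):
--     """
--     Checks if a string is formatted as camel case.
--     """
--     if not string[0].isalnum():
--         return False
--
--     # Check if the string contains only letters and numbers
--     if not all(c.isalnum() or c == '.' for c in string):
--         return False
--
--     # Check if the string contains at least one uppercase letter
--     if not any(c.isupper() for c in string):
--         return False
--
--     if not any(c == '.' for c in string):
--         return False
--
--     return True
-- ===== SOURCE B (Python) =====
-- def is_camel_case_with_dots(string):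
--     if not string[0].isalnum():
--         return False
--     has_upper = has_dot = False
--     for c in string:
--         if c == '.':
--             has_dot = True
--         elif not c.isalnum():
--             return False
--         elif c.isupper():
--             has_upper = True
--     return has_upper and has_dot
-- ===== Notes on version B (the rewrite author's own statement) =====
-- stated objective: simpler
-- what changed: Replaces A's three separate full scans (all alnum-or-dot, any upper, any dot) by a single left-to-right loop that rejects an illegal character immediately while accumulating has_upper/has_dot flags.
import Mathlib
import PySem

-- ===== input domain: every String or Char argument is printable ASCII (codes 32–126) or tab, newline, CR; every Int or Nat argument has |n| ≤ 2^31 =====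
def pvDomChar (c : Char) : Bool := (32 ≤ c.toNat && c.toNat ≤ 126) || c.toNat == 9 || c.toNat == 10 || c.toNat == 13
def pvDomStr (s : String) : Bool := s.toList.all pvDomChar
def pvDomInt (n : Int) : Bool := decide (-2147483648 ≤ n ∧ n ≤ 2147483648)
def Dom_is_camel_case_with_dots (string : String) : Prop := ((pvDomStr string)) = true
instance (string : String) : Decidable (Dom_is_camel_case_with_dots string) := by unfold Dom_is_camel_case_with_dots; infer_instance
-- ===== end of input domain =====

-- B merges A's three separate scans into one early-exit loop with has_upper/has_dot flags (objective: simpler, single pass).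

-- ===== PORT A =====
def is_camel_case_with_dots (string : String) : Bool :=
  match PySem.Str.pyGet? string 0 with
  | none => false  -- Python raises IndexError on "" ; excluded by Pre_
  | some c0 =>
    if !(PySem.Chars.isalnum c0) then false
    else if !(string.toList.all (fun c => PySem.Chars.isalnum c || c == '.')) then false
    else if !(string.toList.any (fun c => PySem.Chars.isupper c)) then false
    else if !(string.toList.any (fun c => c == '.')) then false
    else true

-- ===== PORT B =====
-- the single validation loop of Source B (early return False on an illegal char)
def camelLoop : List Char → Bool → Bool → Bool
  | [], hu, hd => hu && hd
  | c :: cs, hu, hd =>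
    if c == '.' then camelLoop cs hu true
    else if !(PySem.Chars.isalnum c) then false
    else camelLoop cs (hu || PySem.Chars.isupper c) hd

def is_camel_case_with_dots_alt (string : String) : Bool :=
  match PySem.Str.pyGet? string 0 with
  | none => false  -- Source B also raises IndexError on "" ; excluded by Pre_
  | some c0 =>
    if !(PySem.Chars.isalnum c0) then false
    else camelLoop string.toList false false

-- ===== PRECONDITION & SPEC =====
-- Pre_ excludes only the empty string, on which both Pythons raise IndexError at string[0].
def Pre_is_camel_case_with_dots (string : String) : Prop := string ≠ ""
instance (string : String) : Decidable (Pre_is_camel_case_with_dots string) := by unfold Pre_is_camel_case_with_dots; infer_instance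
def pvWitness_is_camel_case_with_dots : String := "Foo.bar"

def Spec_is_camel_case_with_dots (string : String) (out : Bool) : Prop := out = is_camel_case_with_dots_alt string
instance (string : String) (out : Bool) : Decidable (Spec_is_camel_case_with_dots string out) := by unfold Spec_is_camel_case_with_dots; infer_instance

-- ===== CLAIM (what is proved, stated in full; the proofs are below) =====
def Claim_equal_is_camel_case_with_dots : Prop := ∀ (string : String), Dom_is_camel_case_with_dots string → Pre_is_camel_case_with_dots string → Spec_is_camel_case_with_dots string (is_camel_case_with_dots string)

-- ===== LEMMAS AND PROOFS =====
lemma camelLoop_eq (cs : List Char) (hu hd : Bool) :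
    camelLoop cs hu hd =
      (cs.all (fun c => PySem.Chars.isalnum c || c == '.')
        && (hu || cs.any (fun c => PySem.Chars.isupper c))
        && (hd || cs.any (fun c => c == '.'))) := by
  induction cs generalizing hu hd with
  | nil => simp [camelLoop]
  | cons c cs ih =>
    by_cases hdot : c = '.'
    · subst hdot
      have hdu : PySem.Chars.isupper '.' = false := by decide
      simp [camelLoop, ih, hdu, Bool.and_comm, Bool.and_assoc, Bool.and_left_comm]
    · have h1 : (c == '.') = false := by simp [hdot]
      by_cases han : PySem.Chars.isalnum c = true
      · have hup : PySem.Chars.isupper c = (PySem.Chars.isupper c) := rfl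
        simp [camelLoop, h1, han, ih]
        cases hu <;> cases hd <;> cases h : PySem.Chars.isupper c <;>
          simp [Bool.and_comm, Bool.and_assoc, Bool.and_left_comm]
      · have han' : PySem.Chars.isalnum c = false := by
          cases h : PySem.Chars.isalnum c
          · rfl
          · exact absurd h han
        simp [camelLoop, h1, han']

theorem is_camel_case_with_dots_spec : Claim_equal_is_camel_case_with_dots := by
  intro s _ _
  unfold Spec_is_camel_case_with_dots is_camel_case_with_dots is_camel_case_with_dots_alt
  cases hget : PySem.Str.pyGet? s 0 with
  | none => rfl
  | some c0 =>
    simp only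
    by_cases hc0 : PySem.Chars.isalnum c0 = true
    · simp only [hc0, Bool.not_true, Bool.false_eq_true, if_false]
      rw [camelLoop_eq]
      cases hall : s.toList.all (fun c => PySem.Chars.isalnum c || c == '.') <;>
        cases hup : s.toList.any (fun c => PySem.Chars.isupper c) <;>
          cases hd : s.toList.any (fun c => c == '.') <;>
            simp [hall, hup, hd]
    · have : PySem.Chars.isalnum c0 = false := by
        cases h : PySem.Chars.isalnum c0
        · rfl
        · exact absurd h hc0
      simp [this]
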